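-- pv_equiv track=rewrite | github.com/mahmoudsegni/archerycalculator | archerycalculator/utils.py | order_rounds
-- ===== SOURCE A (Python) =====
-- def order_rounds(rounds, age=None, gender=None, bowstyle=None):
--     """
--     Given an iterator of rounds, sort them into an approved order.
--
--     Parameters
--     ----------
--     rounds : dict of str:str
--         dictionary of round codenames mapped to their family
--
--     Returns
--     -------
--     sorted_rounds : dict of str:str
--         dict of sorted rounds input dict
--
--     References
--     ----------
--     """
--
--     # TODO Easy way to do this with dict? Otherwise should we bother?
--     # Just in case, check for aliases and filter
--     # if not any(arg is None for arg in (age, gender, bowstyle)):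
--     #     rounds = [check_alias(round, age, gender, bowstyle) for round in rounds]
--
--     # Sort by family - rounds should already sorted within families. and filtered.
--     order = [
--             "york_hereford_bristol",
--             "stgeorge_albion_windsor",
--             "national",
--             "western",
--             "warwick",
--             "american",
--             "stnicholas",
--             "wa1440",
--             "metric1440",
--             "wa900",
--             "720",
--             "metriclong",
--             "metricshort",
--             ]
--
--     sorted_rounds = {}
--     for family in order:
--         if family == "720":
--             # Special treatment needed to sort the wa720 and metric720 families
--             sorted_rounds.update({key:value for (key,value) in rounds.items() if value == "wa720" and "wa720_50_c" not in key})
--             sorted_rounds.update({key:value for (key,value) in rounds.items() if value == "metric720" and "metric_80" not in key})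
--             sorted_rounds.update({key:value for (key,value) in rounds.items() if value == "wa720" and "wa720_50_c" in key})
--             sorted_rounds.update({key:value for (key,value) in rounds.items() if value == "metric720" and "metric_80" in key})
--         else:
--             sorted_rounds.update({ key:value for (key,value) in rounds.items() if value == family})
--
--     return sorted_rounds
-- ===== SOURCE B (Python) =====
-- def order_rounds(rounds, age=None, gender=None, bowstyle=None):
--     """Rank-and-stable-sort re-implementation: build a family->rank index once,
--     filter out unknown families, and sort the items by rank in one pass."""
--     order = [
--             "york_hereford_bristol",
--             "stgeorge_albion_windsor",
--             "national",
--             "western",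
--             "warwick",
--             "american",
--             "stnicholas",
--             "wa1440",
--             "metric1440",
--             "wa900",
--             "720",
--             "metriclong",
--             "metricshort",
--             ]
--     rank = {}
--     for i, family in enumerate(order):
--         if family == "720":
--             rank["wa720"] = 4 * i
--             rank["metric720"] = 4 * i + 1
--         else:
--             rank[family] = 4 * i
--     def sort_key(kv):
--         key, value = kv
--         r = rank[value]
--         if value == "wa720" and "wa720_50_c" in key:
--             r += 2
--         if value == "metric720" and "metric_80" in key:
--             r += 2
--         return r
--     items = [kv for kv in rounds.items() if kv[1] in rank]
--     return dict(sorted(items, key=sort_key))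
-- ===== Notes on version B (the rewrite author's own statement) =====
-- stated objective: faster
-- what changed: A rescans the whole rounds dict once per family in the fixed order list (16 passes counting the four-way 720 split); B builds a family->rank index once, filters out unknown families in one pass, and produces the result with a single stable sort by rank.
import Mathlib
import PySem

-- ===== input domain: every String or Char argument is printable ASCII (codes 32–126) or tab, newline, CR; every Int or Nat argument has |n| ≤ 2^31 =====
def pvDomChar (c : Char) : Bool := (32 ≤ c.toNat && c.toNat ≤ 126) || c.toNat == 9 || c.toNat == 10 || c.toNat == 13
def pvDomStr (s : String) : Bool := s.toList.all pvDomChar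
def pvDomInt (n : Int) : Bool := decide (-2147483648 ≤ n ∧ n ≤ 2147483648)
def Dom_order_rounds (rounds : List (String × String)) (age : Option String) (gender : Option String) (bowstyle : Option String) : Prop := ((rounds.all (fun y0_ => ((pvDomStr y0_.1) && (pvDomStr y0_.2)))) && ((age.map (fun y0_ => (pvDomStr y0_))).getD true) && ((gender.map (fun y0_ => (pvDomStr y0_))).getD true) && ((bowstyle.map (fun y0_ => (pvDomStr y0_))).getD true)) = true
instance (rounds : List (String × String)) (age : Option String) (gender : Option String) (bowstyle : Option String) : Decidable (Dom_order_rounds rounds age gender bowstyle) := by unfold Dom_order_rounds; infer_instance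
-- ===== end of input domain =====

-- B replaces A's thirteen per-family rescans of the round dict with a single rank index plus one stable sort (objective: alternative).


-- ===== PORT A =====
def order_rounds (rounds : List (String × String)) (age : Option String) (gender : Option String) (bowstyle : Option String) : List (String × String) :=
  -- literal transliteration of A: for each family in the fixed order list, rescan
  -- rounds.items() and dict-update the accumulator with the matching rounds
  let rd := PySem.Dict.ofList rounds
  let order : List String := ["york_hereford_bristol", "stgeorge_albion_windsor", "national",
    "western", "warwick", "american", "stnicholas", "wa1440", "metric1440", "wa900", "720",
    "metriclong", "metricshort"]
  let sortedRounds := order.foldl (fun (d : PySem.Dict String String) family =>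
    if family == "720" then
      let d1 := d.update (rd.items.filter (fun kv => kv.2 == "wa720" && !(PySem.Str.isIn "wa720_50_c" kv.1)))
      let d2 := d1.update (rd.items.filter (fun kv => kv.2 == "metric720" && !(PySem.Str.isIn "metric_80" kv.1)))
      let d3 := d2.update (rd.items.filter (fun kv => kv.2 == "wa720" && PySem.Str.isIn "wa720_50_c" kv.1))
      d3.update (rd.items.filter (fun kv => kv.2 == "metric720" && PySem.Str.isIn "metric_80" kv.1))
    else d.update (rd.items.filter (fun kv => kv.2 == family))) PySem.Dict.empty
  sortedRounds.items

-- ===== PORT B =====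
def order_rounds_alt (rounds : List (String × String)) (age : Option String) (gender : Option String) (bowstyle : Option String) : List (String × String) :=
  -- transliteration of B: build the family -> rank index once, filter the items to
  -- the known families, and stable-sort them by rank
  let rd := PySem.Dict.ofList rounds
  let order : List String := ["york_hereford_bristol", "stgeorge_albion_windsor", "national",
    "western", "warwick", "american", "stnicholas", "wa1440", "metric1440", "wa900", "720",
    "metriclong", "metricshort"]
  let rank : PySem.Dict String Int := (PySem.List.enumerate order).foldl (fun r p =>
    if p.2 == "720" then (r.insert "wa720" (4 * p.1)).insert "metric720" (4 * p.1 + 1)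
    else r.insert p.2 (4 * p.1)) PySem.Dict.empty
  let sortKey : String × String → Int := fun kv =>
    -- rank[value]: the total getD is safe, sortKey is only applied to items that passed the 'kv[1] in rank' filter below
    let r := rank.getD kv.2 0
    let r := if kv.2 == "wa720" && PySem.Str.isIn "wa720_50_c" kv.1 then r + 2 else r
    if kv.2 == "metric720" && PySem.Str.isIn "metric_80" kv.1 then r + 2 else r
  let items := rd.items.filter (fun kv => rank.contains kv.2)
  (PySem.Dict.ofList (PySem.List.sorted items sortKey)).items

-- ===== PRECONDITION & SPEC =====
def Spec_order_rounds (rounds : List (String × String)) (age : Option String) (gender : Option String) (bowstyle : Option String) (out : List (String × String)) : Prop := out = order_rounds_alt rounds age gender bowstyle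
instance (rounds : List (String × String)) (age : Option String) (gender : Option String) (bowstyle : Option String) (out : List (String × String)) : Decidable (Spec_order_rounds rounds age gender bowstyle out) := by unfold Spec_order_rounds; infer_instance

-- ===== CLAIM (what is proved, stated in full; the proofs are below) =====
def Claim_equal_order_rounds : Prop := ∀ (rounds : List (String × String)) (age : Option String) (gender : Option String) (bowstyle : Option String), Dom_order_rounds rounds age gender bowstyle → Spec_order_rounds rounds age gender bowstyle (order_rounds rounds age gender bowstyle)

-- ===== LEMMAS AND PROOFS =====

theorem insert_bucket {α : Type} (key : α → Int) (x : α) (B1 B2 : List α)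
    (h1 : ∀ y ∈ B1, ¬ key x < key y) (h2 : ∀ y ∈ B2, key x < key y) :
    PySem.List.insertBy (fun a b => decide (key a < key b)) x (B1 ++ B2) = B1 ++ x :: B2 := by
  induction B1 with
  | nil =>
    cases B2 with
    | nil => simp [PySem.List.insertBy]
    | cons b bs =>
      simp [PySem.List.insertBy, h2 b (by simp)]
  | cons a as ih =>
    have hna : ¬ key x < key a := h1 a (by simp)
    simp only [List.cons_append, PySem.List.insertBy, decide_eq_true_eq, if_neg hna]
    rw [ih (fun y hy => h1 y (by simp [hy]))]

theorem sorted_buckets {α : Type} (key : α → Int) (rs : List Int) (hrs : rs.Pairwise (· < ·)) :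
    ∀ l : List α, (∀ x ∈ l, key x ∈ rs) →
    PySem.List.sorted l key = rs.flatMap (fun r => l.filter (fun x => key x == r)) := by
  intro l
  induction l using List.reverseRecOn with
  | nil => simp [PySem.List.sorted_eq_foldl_insertBy]
  | append_singleton l x ih =>
    intro hmem
    have hx : key x ∈ rs := hmem x (by simp)
    obtain ⟨r1, r2, hsplit⟩ := List.append_of_mem hx
    subst hsplit
    have hp := hrs
    rw [List.pairwise_append] at hp
    obtain ⟨hp1, hp2, hp12⟩ := hp
    rw [List.pairwise_cons] at hp2
    obtain ⟨hlt2, _⟩ := hp2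
    have hlt1 : ∀ r ∈ r1, r < key x := fun r hr => hp12 r hr _ (by simp)
    have keep : ∀ (rs' : List Int), (∀ r ∈ rs', ¬ r = key x) →
        rs'.flatMap (fun r => (l ++ [x]).filter (fun y => key y == r))
          = rs'.flatMap (fun r => l.filter (fun y => key y == r)) := by
      intro rs' hne
      induction rs' with
      | nil => simp
      | cons r rt iht =>
        rw [List.flatMap_cons, List.flatMap_cons, iht (fun r hr => hne r (by simp [hr]))]
        have hb : (key x == r) = false := by
          simp only [beq_eq_false_iff_ne, ne_eq]
          exact fun h => hne r (by simp) h.symm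
        rw [List.filter_append]
        simp [hb]
    rw [PySem.List.sorted_eq_foldl_insertBy, List.foldl_append, List.foldl_cons, List.foldl_nil]
    rw [← PySem.List.sorted_eq_foldl_insertBy]
    rw [ih (fun y hy => hmem y (by simp [hy]))]
    rw [List.flatMap_append, List.flatMap_cons]
    rw [show r1.flatMap (fun r => l.filter (fun y => key y == r)) ++
          (l.filter (fun y => key y == key x) ++ r2.flatMap (fun r => l.filter (fun y => key y == r)))
        = (r1.flatMap (fun r => l.filter (fun y => key y == r)) ++ l.filter (fun y => key y == key x)) ++
          r2.flatMap (fun r => l.filter (fun y => key y == r)) by simp]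
    rw [insert_bucket key x _ _ ?_ ?_]
    · rw [List.flatMap_append, List.flatMap_cons]
      rw [keep r1 (fun r hr h => absurd (hlt1 r hr) (by omega))]
      rw [keep r2 (fun r hr h => absurd (hlt2 r hr) (by omega))]
      simp [List.filter_append]
    · intro y hy
      simp only [List.mem_append, List.mem_flatMap, List.mem_filter] at hy
      rcases hy with ⟨r, hr, _, hk⟩ | ⟨_, hk⟩
      · have := hlt1 r hr
        have : key y = r := by simpa using hk
        omega
      · have : key y = key x := by simpa using hk
        omega
    · intro y hy
      simp only [List.mem_flatMap, List.mem_filter] at hy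
      obtain ⟨r, hr, _, hk⟩ := hy
      have := hlt2 r hr
      have : key y = r := by simpa using hk
      omega

theorem key_inj {κ ν : Type} [BEq κ] [LawfulBEq κ] {l : List (κ × ν)}
    (hnd : (l.map Prod.fst).Nodup) {x y : κ × ν} (hx : x ∈ l) (hy : y ∈ l)
    (hk : x.1 = y.1) : x = y := by
  have g1 : (PySem.Dict.mk l).get? x.1 = some x.2 :=
    PySem.Dict.get?_of_mem_items _ (by exact hx) (by simpa [PySem.Dict.keys] using hnd)
  have g2 : (PySem.Dict.mk l).get? y.1 = some y.2 :=
    PySem.Dict.get?_of_mem_items _ (by exact hy) (by simpa [PySem.Dict.keys] using hnd)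
  rw [hk, g2] at g1
  exact Prod.ext hk (by simpa using g1.symm)

theorem update_filter_items {ν : Type} (d : PySem.Dict String ν) (l : List (String × ν)) (p : String × ν → Bool)
    (hnd : (l.map Prod.fst).Nodup)
    (hfresh : ∀ x ∈ l, p x = true → d.contains x.1 = false) :
    (d.update (l.filter p)).items = d.items ++ l.filter p := by
  show ((l.filter p).foldl (fun acc q => acc.insert q.1 q.2) d).items = _
  rw [PySem.Dict.items_foldl_insert_fresh (l.filter p) Prod.fst Prod.snd d
      (fun a ha => hfresh a (List.mem_of_mem_filter ha) (List.of_mem_filter ha))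
      ((hnd.sublist (List.Sublist.map Prod.fst List.filter_sublist)))]
  simp

theorem chain_items {ν : Type} (f : String × ν → Option Int) (l : List (String × ν))
    (hnd : (l.map Prod.fst).Nodup) :
    ∀ (rs : List Int) (d : PySem.Dict String ν), d.keys.Nodup → rs.Nodup →
    (∀ x ∈ l, ∀ r ∈ rs, f x = some r → d.contains x.1 = false) →
    (rs.foldl (fun d r => d.update (l.filter (fun x => f x == some r))) d).items
      = d.items ++ rs.flatMap (fun r => l.filter (fun x => f x == some r)) := by
  intro rs
  induction rs with
  | nil => intro d _ _ _; simp
  | cons r rt ih =>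
    intro d hdk hnde hfresh
    rw [List.foldl_cons, List.flatMap_cons]
    have hup := update_filter_items d l (fun x => f x == some r) hnd
      (fun x hx hp => hfresh x hx r (by simp) (by simpa using hp))
    have hdk' : (d.update (l.filter (fun x => f x == some r))).keys.Nodup := by
      show ((l.filter _).foldl (fun acc q => acc.insert q.1 q.2) d).keys.Nodup
      exact PySem.Dict.nodup_keys_foldl_insert_key _ Prod.fst (fun d a => a.2) d hdk
    rw [ih _ hdk' (List.Nodup.of_cons hnde) ?_, hup, List.append_assoc]
    intro x hx r' hr' hfx
    by_contra hcon
    have hmemk : x.1 ∈ (d.update (l.filter (fun x => f x == some r))).keys := by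
      rw [← PySem.Dict.contains_iff_mem_keys]
      cases h : (d.update (l.filter (fun x => f x == some r))).contains x.1
      · exact absurd h hcon
      · rfl
    have hkeys : (d.update (l.filter (fun x => f x == some r))).keys
        = PySem.Set.update d.keys ((l.filter (fun x => f x == some r)).map Prod.fst) := by
      show ((l.filter _).foldl (fun acc q => acc.insert q.1 q.2) d).keys = _
      exact PySem.Dict.keys_foldl_insert_key _ Prod.fst (fun d a => a.2) d
    rw [hkeys, PySem.Set.mem_update] at hmemk
    rcases hmemk with hmem | hmem
    · have := hfresh x hx r' (by simp [hr']) hfx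
      rw [← PySem.Dict.contains_iff_mem_keys] at hmem
      simp [this] at hmem
    · simp only [List.mem_map, List.mem_filter] at hmem
      obtain ⟨y, ⟨hyl, hyp⟩, hyk⟩ := hmem
      have hxy : y = x := key_inj hnd hyl hx hyk
      subst hxy
      rw [hfx] at hyp
      have : r' = r := by simpa using hyp.symm
      subst this
      exact (List.nodup_cons.mp hnde).1 hr'

def rankB : PySem.Dict String Int := PySem.Dict.mk
  [("york_hereford_bristol", 0), ("stgeorge_albion_windsor", 4), ("national", 8),
   ("western", 12), ("warwick", 16), ("american", 20), ("stnicholas", 24), ("wa1440", 28),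
   ("metric1440", 32), ("wa900", 36), ("wa720", 40), ("metric720", 41), ("metriclong", 44),
   ("metricshort", 48)]

theorem rank_eq_rankB : (PySem.List.enumerate ["york_hereford_bristol", "stgeorge_albion_windsor", "national",
    "western", "warwick", "american", "stnicholas", "wa1440", "metric1440", "wa900", "720",
    "metriclong", "metricshort"]).foldl (fun r p =>
    if p.2 == "720" then (r.insert "wa720" (4 * p.1)).insert "metric720" (4 * p.1 + 1)
    else r.insert p.2 (4 * p.1)) PySem.Dict.empty = rankB := by decide

def fkey (kv : String × String) : Option Int :=
  if kv.2 = "york_hereford_bristol" then some 0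
  else if kv.2 = "stgeorge_albion_windsor" then some 4
  else if kv.2 = "national" then some 8
  else if kv.2 = "western" then some 12
  else if kv.2 = "warwick" then some 16
  else if kv.2 = "american" then some 20
  else if kv.2 = "stnicholas" then some 24
  else if kv.2 = "wa1440" then some 28
  else if kv.2 = "metric1440" then some 32
  else if kv.2 = "wa900" then some 36
  else if kv.2 = "wa720" then (if PySem.Str.isIn "wa720_50_c" kv.1 then some 42 else some 40)
  else if kv.2 = "metric720" then (if PySem.Str.isIn "metric_80" kv.1 then some 43 else some 41)
  else if kv.2 = "metriclong" then some 44
  else if kv.2 = "metricshort" then some 48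
  else none

def sortKeyB (kv : String × String) : Int :=
  let r := rankB.getD kv.2 0
  let r := if kv.2 == "wa720" && PySem.Str.isIn "wa720_50_c" kv.1 then r + 2 else r
  if kv.2 == "metric720" && PySem.Str.isIn "metric_80" kv.1 then r + 2 else r

def ranks16 : List Int := [0,4,8,12,16,20,24,28,32,36,40,41,42,43,44,48]


theorem L1 (kv : String × String) : rankB.contains kv.2 = (fkey kv).isSome := by
  simp only [rankB, PySem.Dict.contains, PySem.Dict.items, List.any_cons, List.any_nil, Bool.or_false]
  unfold fkey
  by_cases h0 : kv.2 = "york_hereford_bristol"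
  · simp [*, beq_iff_eq]
    try (split_ifs <;> simp [*, beq_iff_eq])
  by_cases h1 : kv.2 = "stgeorge_albion_windsor"
  · simp [*, beq_iff_eq]
    try (split_ifs <;> simp [*, beq_iff_eq])
  by_cases h2 : kv.2 = "national"
  · simp [*, beq_iff_eq]
    try (split_ifs <;> simp [*, beq_iff_eq])
  by_cases h3 : kv.2 = "western"
  · simp [*, beq_iff_eq]
    try (split_ifs <;> simp [*, beq_iff_eq])
  by_cases h4 : kv.2 = "warwick"
  · simp [*, beq_iff_eq]
    try (split_ifs <;> simp [*, beq_iff_eq])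
  by_cases h5 : kv.2 = "american"
  · simp [*, beq_iff_eq]
    try (split_ifs <;> simp [*, beq_iff_eq])
  by_cases h6 : kv.2 = "stnicholas"
  · simp [*, beq_iff_eq]
    try (split_ifs <;> simp [*, beq_iff_eq])
  by_cases h7 : kv.2 = "wa1440"
  · simp [*, beq_iff_eq]
    try (split_ifs <;> simp [*, beq_iff_eq])
  by_cases h8 : kv.2 = "metric1440"
  · simp [*, beq_iff_eq]
    try (split_ifs <;> simp [*, beq_iff_eq])
  by_cases h9 : kv.2 = "wa900"
  · simp [*, beq_iff_eq]
    try (split_ifs <;> simp [*, beq_iff_eq])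
  by_cases h10 : kv.2 = "wa720"
  · simp [*, beq_iff_eq]
    try (split_ifs <;> simp [*, beq_iff_eq])
  by_cases h11 : kv.2 = "metric720"
  · simp [*, beq_iff_eq]
    try (split_ifs <;> simp [*, beq_iff_eq])
  by_cases h12 : kv.2 = "metriclong"
  · simp [*, beq_iff_eq]
    try (split_ifs <;> simp [*, beq_iff_eq])
  by_cases h13 : kv.2 = "metricshort"
  · simp [*, beq_iff_eq]
    try (split_ifs <;> simp [*, beq_iff_eq])
  simp [*, beq_iff_eq]
  exact ⟨fun e => h0 e.symm, fun e => h1 e.symm, fun e => h2 e.symm, fun e => h3 e.symm,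
    fun e => h4 e.symm, fun e => h5 e.symm, fun e => h6 e.symm, fun e => h7 e.symm,
    fun e => h8 e.symm, fun e => h9 e.symm, fun e => h10 e.symm, fun e => h11 e.symm,
    fun e => h12 e.symm, fun e => h13 e.symm⟩

theorem L2 (kv : String × String) (h : rankB.contains kv.2 = true) :
    fkey kv = some (sortKeyB kv) := by
  simp only [rankB, PySem.Dict.contains, PySem.Dict.items, List.any_cons, List.any_nil, Bool.or_false] at h
  unfold fkey sortKeyB
  by_cases h0 : kv.2 = "york_hereford_bristol"
  · simp [*, PySem.Dict.getD, PySem.Dict.get?_mk_cons, rankB, beq_iff_eq]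
    try (split_ifs <;> simp [*, PySem.Dict.getD, PySem.Dict.get?_mk_cons, rankB, beq_iff_eq])
  by_cases h1 : kv.2 = "stgeorge_albion_windsor"
  · simp [*, PySem.Dict.getD, PySem.Dict.get?_mk_cons, rankB, beq_iff_eq]
    try (split_ifs <;> simp [*, PySem.Dict.getD, PySem.Dict.get?_mk_cons, rankB, beq_iff_eq])
  by_cases h2 : kv.2 = "national"
  · simp [*, PySem.Dict.getD, PySem.Dict.get?_mk_cons, rankB, beq_iff_eq]
    try (split_ifs <;> simp [*, PySem.Dict.getD, PySem.Dict.get?_mk_cons, rankB, beq_iff_eq])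
  by_cases h3 : kv.2 = "western"
  · simp [*, PySem.Dict.getD, PySem.Dict.get?_mk_cons, rankB, beq_iff_eq]
    try (split_ifs <;> simp [*, PySem.Dict.getD, PySem.Dict.get?_mk_cons, rankB, beq_iff_eq])
  by_cases h4 : kv.2 = "warwick"
  · simp [*, PySem.Dict.getD, PySem.Dict.get?_mk_cons, rankB, beq_iff_eq]
    try (split_ifs <;> simp [*, PySem.Dict.getD, PySem.Dict.get?_mk_cons, rankB, beq_iff_eq])
  by_cases h5 : kv.2 = "american"
  · simp [*, PySem.Dict.getD, PySem.Dict.get?_mk_cons, rankB, beq_iff_eq]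
    try (split_ifs <;> simp [*, PySem.Dict.getD, PySem.Dict.get?_mk_cons, rankB, beq_iff_eq])
  by_cases h6 : kv.2 = "stnicholas"
  · simp [*, PySem.Dict.getD, PySem.Dict.get?_mk_cons, rankB, beq_iff_eq]
    try (split_ifs <;> simp [*, PySem.Dict.getD, PySem.Dict.get?_mk_cons, rankB, beq_iff_eq])
  by_cases h7 : kv.2 = "wa1440"
  · simp [*, PySem.Dict.getD, PySem.Dict.get?_mk_cons, rankB, beq_iff_eq]
    try (split_ifs <;> simp [*, PySem.Dict.getD, PySem.Dict.get?_mk_cons, rankB, beq_iff_eq])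
  by_cases h8 : kv.2 = "metric1440"
  · simp [*, PySem.Dict.getD, PySem.Dict.get?_mk_cons, rankB, beq_iff_eq]
    try (split_ifs <;> simp [*, PySem.Dict.getD, PySem.Dict.get?_mk_cons, rankB, beq_iff_eq])
  by_cases h9 : kv.2 = "wa900"
  · simp [*, PySem.Dict.getD, PySem.Dict.get?_mk_cons, rankB, beq_iff_eq]
    try (split_ifs <;> simp [*, PySem.Dict.getD, PySem.Dict.get?_mk_cons, rankB, beq_iff_eq])
  by_cases h10 : kv.2 = "wa720"
  · simp [*, PySem.Dict.getD, PySem.Dict.get?_mk_cons, rankB, beq_iff_eq]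
    try (split_ifs <;> simp [*, PySem.Dict.getD, PySem.Dict.get?_mk_cons, rankB, beq_iff_eq])
  by_cases h11 : kv.2 = "metric720"
  · simp [*, PySem.Dict.getD, PySem.Dict.get?_mk_cons, rankB, beq_iff_eq]
    try (split_ifs <;> simp [*, PySem.Dict.getD, PySem.Dict.get?_mk_cons, rankB, beq_iff_eq])
  by_cases h12 : kv.2 = "metriclong"
  · simp [*, PySem.Dict.getD, PySem.Dict.get?_mk_cons, rankB, beq_iff_eq]
    try (split_ifs <;> simp [*, PySem.Dict.getD, PySem.Dict.get?_mk_cons, rankB, beq_iff_eq])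
  by_cases h13 : kv.2 = "metricshort"
  · simp [*, PySem.Dict.getD, PySem.Dict.get?_mk_cons, rankB, beq_iff_eq]
    try (split_ifs <;> simp [*, PySem.Dict.getD, PySem.Dict.get?_mk_cons, rankB, beq_iff_eq])
  exfalso
  simp only [Bool.or_eq_true, beq_iff_eq] at h
  rcases h with e|e|e|e|e|e|e|e|e|e|e|e|e|e <;> exact absurd e.symm (by assumption)

theorem L3 (kv : String × String) (r : Int) (h : fkey kv = some r) : r ∈ ranks16 := by
  unfold fkey at h
  by_cases h0 : kv.2 = "york_hereford_bristol"
  · simp [*] at h; first | (rw [← h]; decide) | (rw [h]; decide)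
  by_cases h1 : kv.2 = "stgeorge_albion_windsor"
  · simp [*] at h; first | (rw [← h]; decide) | (rw [h]; decide)
  by_cases h2 : kv.2 = "national"
  · simp [*] at h; first | (rw [← h]; decide) | (rw [h]; decide)
  by_cases h3 : kv.2 = "western"
  · simp [*] at h; first | (rw [← h]; decide) | (rw [h]; decide)
  by_cases h4 : kv.2 = "warwick"
  · simp [*] at h; first | (rw [← h]; decide) | (rw [h]; decide)
  by_cases h5 : kv.2 = "american"
  · simp [*] at h; first | (rw [← h]; decide) | (rw [h]; decide)
  by_cases h6 : kv.2 = "stnicholas"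
  · simp [*] at h; first | (rw [← h]; decide) | (rw [h]; decide)
  by_cases h7 : kv.2 = "wa1440"
  · simp [*] at h; first | (rw [← h]; decide) | (rw [h]; decide)
  by_cases h8 : kv.2 = "metric1440"
  · simp [*] at h; first | (rw [← h]; decide) | (rw [h]; decide)
  by_cases h9 : kv.2 = "wa900"
  · simp [*] at h; first | (rw [← h]; decide) | (rw [h]; decide)
  by_cases h10 : kv.2 = "wa720"
  · by_cases hc : PySem.Str.isIn "wa720_50_c" kv.1 = true
    all_goals simp [PySem.Str.isIn] at hc
    all_goals simp [*] at h
    all_goals first | (rw [← h]; decide) | (rw [h]; decide)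
  by_cases h11 : kv.2 = "metric720"
  · by_cases hc : PySem.Str.isIn "metric_80" kv.1 = true
    all_goals simp [PySem.Str.isIn] at hc
    all_goals simp [*] at h
    all_goals first | (rw [← h]; decide) | (rw [h]; decide)
  by_cases h12 : kv.2 = "metriclong"
  · simp [*] at h; first | (rw [← h]; decide) | (rw [h]; decide)
  by_cases h13 : kv.2 = "metricshort"
  · simp [*] at h; first | (rw [← h]; decide) | (rw [h]; decide)
  simp [*] at h

theorem PA0 (kv : String × String) : (kv.2 == "york_hereford_bristol") = (fkey kv == some 0) := by
  unfold fkey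
  by_cases h0 : kv.2 = "york_hereford_bristol"
  · simp [*]
  by_cases h1 : kv.2 = "stgeorge_albion_windsor"
  · simp [*]
  by_cases h2 : kv.2 = "national"
  · simp [*]
  by_cases h3 : kv.2 = "western"
  · simp [*]
  by_cases h4 : kv.2 = "warwick"
  · simp [*]
  by_cases h5 : kv.2 = "american"
  · simp [*]
  by_cases h6 : kv.2 = "stnicholas"
  · simp [*]
  by_cases h7 : kv.2 = "wa1440"
  · simp [*]
  by_cases h8 : kv.2 = "metric1440"
  · simp [*]
  by_cases h9 : kv.2 = "wa900"
  · simp [*]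
  by_cases h10 : kv.2 = "wa720"
  · by_cases hc : PySem.Str.isIn "wa720_50_c" kv.1 = true
    all_goals simp [PySem.Str.isIn] at hc
    all_goals simp [*, PySem.Str.isIn]
  by_cases h11 : kv.2 = "metric720"
  · by_cases hc : PySem.Str.isIn "metric_80" kv.1 = true
    all_goals simp [PySem.Str.isIn] at hc
    all_goals simp [*, PySem.Str.isIn]
  by_cases h12 : kv.2 = "metriclong"
  · simp [*]
  by_cases h13 : kv.2 = "metricshort"
  · simp [*]
  simp [*]

theorem PA4 (kv : String × String) : (kv.2 == "stgeorge_albion_windsor") = (fkey kv == some 4) := by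
  unfold fkey
  by_cases h0 : kv.2 = "york_hereford_bristol"
  · simp [*]
  by_cases h1 : kv.2 = "stgeorge_albion_windsor"
  · simp [*]
  by_cases h2 : kv.2 = "national"
  · simp [*]
  by_cases h3 : kv.2 = "western"
  · simp [*]
  by_cases h4 : kv.2 = "warwick"
  · simp [*]
  by_cases h5 : kv.2 = "american"
  · simp [*]
  by_cases h6 : kv.2 = "stnicholas"
  · simp [*]
  by_cases h7 : kv.2 = "wa1440"
  · simp [*]
  by_cases h8 : kv.2 = "metric1440"
  · simp [*]
  by_cases h9 : kv.2 = "wa900"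
  · simp [*]
  by_cases h10 : kv.2 = "wa720"
  · by_cases hc : PySem.Str.isIn "wa720_50_c" kv.1 = true
    all_goals simp [PySem.Str.isIn] at hc
    all_goals simp [*, PySem.Str.isIn]
  by_cases h11 : kv.2 = "metric720"
  · by_cases hc : PySem.Str.isIn "metric_80" kv.1 = true
    all_goals simp [PySem.Str.isIn] at hc
    all_goals simp [*, PySem.Str.isIn]
  by_cases h12 : kv.2 = "metriclong"
  · simp [*]
  by_cases h13 : kv.2 = "metricshort"
  · simp [*]
  simp [*]

theorem PA8 (kv : String × String) : (kv.2 == "national") = (fkey kv == some 8) := by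
  unfold fkey
  by_cases h0 : kv.2 = "york_hereford_bristol"
  · simp [*]
  by_cases h1 : kv.2 = "stgeorge_albion_windsor"
  · simp [*]
  by_cases h2 : kv.2 = "national"
  · simp [*]
  by_cases h3 : kv.2 = "western"
  · simp [*]
  by_cases h4 : kv.2 = "warwick"
  · simp [*]
  by_cases h5 : kv.2 = "american"
  · simp [*]
  by_cases h6 : kv.2 = "stnicholas"
  · simp [*]
  by_cases h7 : kv.2 = "wa1440"
  · simp [*]
  by_cases h8 : kv.2 = "metric1440"
  · simp [*]
  by_cases h9 : kv.2 = "wa900"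
  · simp [*]
  by_cases h10 : kv.2 = "wa720"
  · by_cases hc : PySem.Str.isIn "wa720_50_c" kv.1 = true
    all_goals simp [PySem.Str.isIn] at hc
    all_goals simp [*, PySem.Str.isIn]
  by_cases h11 : kv.2 = "metric720"
  · by_cases hc : PySem.Str.isIn "metric_80" kv.1 = true
    all_goals simp [PySem.Str.isIn] at hc
    all_goals simp [*, PySem.Str.isIn]
  by_cases h12 : kv.2 = "metriclong"
  · simp [*]
  by_cases h13 : kv.2 = "metricshort"
  · simp [*]
  simp [*]

theorem PA12 (kv : String × String) : (kv.2 == "western") = (fkey kv == some 12) := by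
  unfold fkey
  by_cases h0 : kv.2 = "york_hereford_bristol"
  · simp [*]
  by_cases h1 : kv.2 = "stgeorge_albion_windsor"
  · simp [*]
  by_cases h2 : kv.2 = "national"
  · simp [*]
  by_cases h3 : kv.2 = "western"
  · simp [*]
  by_cases h4 : kv.2 = "warwick"
  · simp [*]
  by_cases h5 : kv.2 = "american"
  · simp [*]
  by_cases h6 : kv.2 = "stnicholas"
  · simp [*]
  by_cases h7 : kv.2 = "wa1440"
  · simp [*]
  by_cases h8 : kv.2 = "metric1440"
  · simp [*]
  by_cases h9 : kv.2 = "wa900"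
  · simp [*]
  by_cases h10 : kv.2 = "wa720"
  · by_cases hc : PySem.Str.isIn "wa720_50_c" kv.1 = true
    all_goals simp [PySem.Str.isIn] at hc
    all_goals simp [*, PySem.Str.isIn]
  by_cases h11 : kv.2 = "metric720"
  · by_cases hc : PySem.Str.isIn "metric_80" kv.1 = true
    all_goals simp [PySem.Str.isIn] at hc
    all_goals simp [*, PySem.Str.isIn]
  by_cases h12 : kv.2 = "metriclong"
  · simp [*]
  by_cases h13 : kv.2 = "metricshort"
  · simp [*]
  simp [*]

theorem PA16 (kv : String × String) : (kv.2 == "warwick") = (fkey kv == some 16) := by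
  unfold fkey
  by_cases h0 : kv.2 = "york_hereford_bristol"
  · simp [*]
  by_cases h1 : kv.2 = "stgeorge_albion_windsor"
  · simp [*]
  by_cases h2 : kv.2 = "national"
  · simp [*]
  by_cases h3 : kv.2 = "western"
  · simp [*]
  by_cases h4 : kv.2 = "warwick"
  · simp [*]
  by_cases h5 : kv.2 = "american"
  · simp [*]
  by_cases h6 : kv.2 = "stnicholas"
  · simp [*]
  by_cases h7 : kv.2 = "wa1440"
  · simp [*]
  by_cases h8 : kv.2 = "metric1440"
  · simp [*]
  by_cases h9 : kv.2 = "wa900"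
  · simp [*]
  by_cases h10 : kv.2 = "wa720"
  · by_cases hc : PySem.Str.isIn "wa720_50_c" kv.1 = true
    all_goals simp [PySem.Str.isIn] at hc
    all_goals simp [*, PySem.Str.isIn]
  by_cases h11 : kv.2 = "metric720"
  · by_cases hc : PySem.Str.isIn "metric_80" kv.1 = true
    all_goals simp [PySem.Str.isIn] at hc
    all_goals simp [*, PySem.Str.isIn]
  by_cases h12 : kv.2 = "metriclong"
  · simp [*]
  by_cases h13 : kv.2 = "metricshort"
  · simp [*]
  simp [*]

theorem PA20 (kv : String × String) : (kv.2 == "american") = (fkey kv == some 20) := by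
  unfold fkey
  by_cases h0 : kv.2 = "york_hereford_bristol"
  · simp [*]
  by_cases h1 : kv.2 = "stgeorge_albion_windsor"
  · simp [*]
  by_cases h2 : kv.2 = "national"
  · simp [*]
  by_cases h3 : kv.2 = "western"
  · simp [*]
  by_cases h4 : kv.2 = "warwick"
  · simp [*]
  by_cases h5 : kv.2 = "american"
  · simp [*]
  by_cases h6 : kv.2 = "stnicholas"
  · simp [*]
  by_cases h7 : kv.2 = "wa1440"
  · simp [*]
  by_cases h8 : kv.2 = "metric1440"
  · simp [*]
  by_cases h9 : kv.2 = "wa900"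
  · simp [*]
  by_cases h10 : kv.2 = "wa720"
  · by_cases hc : PySem.Str.isIn "wa720_50_c" kv.1 = true
    all_goals simp [PySem.Str.isIn] at hc
    all_goals simp [*, PySem.Str.isIn]
  by_cases h11 : kv.2 = "metric720"
  · by_cases hc : PySem.Str.isIn "metric_80" kv.1 = true
    all_goals simp [PySem.Str.isIn] at hc
    all_goals simp [*, PySem.Str.isIn]
  by_cases h12 : kv.2 = "metriclong"
  · simp [*]
  by_cases h13 : kv.2 = "metricshort"
  · simp [*]
  simp [*]

theorem PA24 (kv : String × String) : (kv.2 == "stnicholas") = (fkey kv == some 24) := by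
  unfold fkey
  by_cases h0 : kv.2 = "york_hereford_bristol"
  · simp [*]
  by_cases h1 : kv.2 = "stgeorge_albion_windsor"
  · simp [*]
  by_cases h2 : kv.2 = "national"
  · simp [*]
  by_cases h3 : kv.2 = "western"
  · simp [*]
  by_cases h4 : kv.2 = "warwick"
  · simp [*]
  by_cases h5 : kv.2 = "american"
  · simp [*]
  by_cases h6 : kv.2 = "stnicholas"
  · simp [*]
  by_cases h7 : kv.2 = "wa1440"
  · simp [*]
  by_cases h8 : kv.2 = "metric1440"
  · simp [*]
  by_cases h9 : kv.2 = "wa900"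
  · simp [*]
  by_cases h10 : kv.2 = "wa720"
  · by_cases hc : PySem.Str.isIn "wa720_50_c" kv.1 = true
    all_goals simp [PySem.Str.isIn] at hc
    all_goals simp [*, PySem.Str.isIn]
  by_cases h11 : kv.2 = "metric720"
  · by_cases hc : PySem.Str.isIn "metric_80" kv.1 = true
    all_goals simp [PySem.Str.isIn] at hc
    all_goals simp [*, PySem.Str.isIn]
  by_cases h12 : kv.2 = "metriclong"
  · simp [*]
  by_cases h13 : kv.2 = "metricshort"
  · simp [*]
  simp [*]

theorem PA28 (kv : String × String) : (kv.2 == "wa1440") = (fkey kv == some 28) := by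
  unfold fkey
  by_cases h0 : kv.2 = "york_hereford_bristol"
  · simp [*]
  by_cases h1 : kv.2 = "stgeorge_albion_windsor"
  · simp [*]
  by_cases h2 : kv.2 = "national"
  · simp [*]
  by_cases h3 : kv.2 = "western"
  · simp [*]
  by_cases h4 : kv.2 = "warwick"
  · simp [*]
  by_cases h5 : kv.2 = "american"
  · simp [*]
  by_cases h6 : kv.2 = "stnicholas"
  · simp [*]
  by_cases h7 : kv.2 = "wa1440"
  · simp [*]
  by_cases h8 : kv.2 = "metric1440"
  · simp [*]
  by_cases h9 : kv.2 = "wa900"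
  · simp [*]
  by_cases h10 : kv.2 = "wa720"
  · by_cases hc : PySem.Str.isIn "wa720_50_c" kv.1 = true
    all_goals simp [PySem.Str.isIn] at hc
    all_goals simp [*, PySem.Str.isIn]
  by_cases h11 : kv.2 = "metric720"
  · by_cases hc : PySem.Str.isIn "metric_80" kv.1 = true
    all_goals simp [PySem.Str.isIn] at hc
    all_goals simp [*, PySem.Str.isIn]
  by_cases h12 : kv.2 = "metriclong"
  · simp [*]
  by_cases h13 : kv.2 = "metricshort"
  · simp [*]
  simp [*]

theorem PA32 (kv : String × String) : (kv.2 == "metric1440") = (fkey kv == some 32) := by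
  unfold fkey
  by_cases h0 : kv.2 = "york_hereford_bristol"
  · simp [*]
  by_cases h1 : kv.2 = "stgeorge_albion_windsor"
  · simp [*]
  by_cases h2 : kv.2 = "national"
  · simp [*]
  by_cases h3 : kv.2 = "western"
  · simp [*]
  by_cases h4 : kv.2 = "warwick"
  · simp [*]
  by_cases h5 : kv.2 = "american"
  · simp [*]
  by_cases h6 : kv.2 = "stnicholas"
  · simp [*]
  by_cases h7 : kv.2 = "wa1440"
  · simp [*]
  by_cases h8 : kv.2 = "metric1440"
  · simp [*]
  by_cases h9 : kv.2 = "wa900"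
  · simp [*]
  by_cases h10 : kv.2 = "wa720"
  · by_cases hc : PySem.Str.isIn "wa720_50_c" kv.1 = true
    all_goals simp [PySem.Str.isIn] at hc
    all_goals simp [*, PySem.Str.isIn]
  by_cases h11 : kv.2 = "metric720"
  · by_cases hc : PySem.Str.isIn "metric_80" kv.1 = true
    all_goals simp [PySem.Str.isIn] at hc
    all_goals simp [*, PySem.Str.isIn]
  by_cases h12 : kv.2 = "metriclong"
  · simp [*]
  by_cases h13 : kv.2 = "metricshort"
  · simp [*]
  simp [*]

theorem PA36 (kv : String × String) : (kv.2 == "wa900") = (fkey kv == some 36) := by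
  unfold fkey
  by_cases h0 : kv.2 = "york_hereford_bristol"
  · simp [*]
  by_cases h1 : kv.2 = "stgeorge_albion_windsor"
  · simp [*]
  by_cases h2 : kv.2 = "national"
  · simp [*]
  by_cases h3 : kv.2 = "western"
  · simp [*]
  by_cases h4 : kv.2 = "warwick"
  · simp [*]
  by_cases h5 : kv.2 = "american"
  · simp [*]
  by_cases h6 : kv.2 = "stnicholas"
  · simp [*]
  by_cases h7 : kv.2 = "wa1440"
  · simp [*]
  by_cases h8 : kv.2 = "metric1440"
  · simp [*]
  by_cases h9 : kv.2 = "wa900"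
  · simp [*]
  by_cases h10 : kv.2 = "wa720"
  · by_cases hc : PySem.Str.isIn "wa720_50_c" kv.1 = true
    all_goals simp [PySem.Str.isIn] at hc
    all_goals simp [*, PySem.Str.isIn]
  by_cases h11 : kv.2 = "metric720"
  · by_cases hc : PySem.Str.isIn "metric_80" kv.1 = true
    all_goals simp [PySem.Str.isIn] at hc
    all_goals simp [*, PySem.Str.isIn]
  by_cases h12 : kv.2 = "metriclong"
  · simp [*]
  by_cases h13 : kv.2 = "metricshort"
  · simp [*]
  simp [*]

theorem PA40 (kv : String × String) : (kv.2 == "wa720" && !(PySem.Str.isIn "wa720_50_c" kv.1)) = (fkey kv == some 40) := by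
  unfold fkey
  by_cases h0 : kv.2 = "york_hereford_bristol"
  · simp [*]
  by_cases h1 : kv.2 = "stgeorge_albion_windsor"
  · simp [*]
  by_cases h2 : kv.2 = "national"
  · simp [*]
  by_cases h3 : kv.2 = "western"
  · simp [*]
  by_cases h4 : kv.2 = "warwick"
  · simp [*]
  by_cases h5 : kv.2 = "american"
  · simp [*]
  by_cases h6 : kv.2 = "stnicholas"
  · simp [*]
  by_cases h7 : kv.2 = "wa1440"
  · simp [*]
  by_cases h8 : kv.2 = "metric1440"
  · simp [*]
  by_cases h9 : kv.2 = "wa900"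
  · simp [*]
  by_cases h10 : kv.2 = "wa720"
  · by_cases hc : PySem.Str.isIn "wa720_50_c" kv.1 = true
    all_goals simp [PySem.Str.isIn] at hc
    all_goals simp [*, PySem.Str.isIn]
  by_cases h11 : kv.2 = "metric720"
  · by_cases hc : PySem.Str.isIn "metric_80" kv.1 = true
    all_goals simp [PySem.Str.isIn] at hc
    all_goals simp [*, PySem.Str.isIn]
  by_cases h12 : kv.2 = "metriclong"
  · simp [*]
  by_cases h13 : kv.2 = "metricshort"
  · simp [*]
  simp [*]

theorem PA41 (kv : String × String) : (kv.2 == "metric720" && !(PySem.Str.isIn "metric_80" kv.1)) = (fkey kv == some 41) := by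
  unfold fkey
  by_cases h0 : kv.2 = "york_hereford_bristol"
  · simp [*]
  by_cases h1 : kv.2 = "stgeorge_albion_windsor"
  · simp [*]
  by_cases h2 : kv.2 = "national"
  · simp [*]
  by_cases h3 : kv.2 = "western"
  · simp [*]
  by_cases h4 : kv.2 = "warwick"
  · simp [*]
  by_cases h5 : kv.2 = "american"
  · simp [*]
  by_cases h6 : kv.2 = "stnicholas"
  · simp [*]
  by_cases h7 : kv.2 = "wa1440"
  · simp [*]
  by_cases h8 : kv.2 = "metric1440"
  · simp [*]
  by_cases h9 : kv.2 = "wa900"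
  · simp [*]
  by_cases h10 : kv.2 = "wa720"
  · by_cases hc : PySem.Str.isIn "wa720_50_c" kv.1 = true
    all_goals simp [PySem.Str.isIn] at hc
    all_goals simp [*, PySem.Str.isIn]
  by_cases h11 : kv.2 = "metric720"
  · by_cases hc : PySem.Str.isIn "metric_80" kv.1 = true
    all_goals simp [PySem.Str.isIn] at hc
    all_goals simp [*, PySem.Str.isIn]
  by_cases h12 : kv.2 = "metriclong"
  · simp [*]
  by_cases h13 : kv.2 = "metricshort"
  · simp [*]
  simp [*]

theorem PA42 (kv : String × String) : (kv.2 == "wa720" && PySem.Str.isIn "wa720_50_c" kv.1) = (fkey kv == some 42) := by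
  unfold fkey
  by_cases h0 : kv.2 = "york_hereford_bristol"
  · simp [*]
  by_cases h1 : kv.2 = "stgeorge_albion_windsor"
  · simp [*]
  by_cases h2 : kv.2 = "national"
  · simp [*]
  by_cases h3 : kv.2 = "western"
  · simp [*]
  by_cases h4 : kv.2 = "warwick"
  · simp [*]
  by_cases h5 : kv.2 = "american"
  · simp [*]
  by_cases h6 : kv.2 = "stnicholas"
  · simp [*]
  by_cases h7 : kv.2 = "wa1440"
  · simp [*]
  by_cases h8 : kv.2 = "metric1440"
  · simp [*]
  by_cases h9 : kv.2 = "wa900"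
  · simp [*]
  by_cases h10 : kv.2 = "wa720"
  · by_cases hc : PySem.Str.isIn "wa720_50_c" kv.1 = true
    all_goals simp [PySem.Str.isIn] at hc
    all_goals simp [*, PySem.Str.isIn]
  by_cases h11 : kv.2 = "metric720"
  · by_cases hc : PySem.Str.isIn "metric_80" kv.1 = true
    all_goals simp [PySem.Str.isIn] at hc
    all_goals simp [*, PySem.Str.isIn]
  by_cases h12 : kv.2 = "metriclong"
  · simp [*]
  by_cases h13 : kv.2 = "metricshort"
  · simp [*]
  simp [*]

theorem PA43 (kv : String × String) : (kv.2 == "metric720" && PySem.Str.isIn "metric_80" kv.1) = (fkey kv == some 43) := by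
  unfold fkey
  by_cases h0 : kv.2 = "york_hereford_bristol"
  · simp [*]
  by_cases h1 : kv.2 = "stgeorge_albion_windsor"
  · simp [*]
  by_cases h2 : kv.2 = "national"
  · simp [*]
  by_cases h3 : kv.2 = "western"
  · simp [*]
  by_cases h4 : kv.2 = "warwick"
  · simp [*]
  by_cases h5 : kv.2 = "american"
  · simp [*]
  by_cases h6 : kv.2 = "stnicholas"
  · simp [*]
  by_cases h7 : kv.2 = "wa1440"
  · simp [*]
  by_cases h8 : kv.2 = "metric1440"
  · simp [*]
  by_cases h9 : kv.2 = "wa900"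
  · simp [*]
  by_cases h10 : kv.2 = "wa720"
  · by_cases hc : PySem.Str.isIn "wa720_50_c" kv.1 = true
    all_goals simp [PySem.Str.isIn] at hc
    all_goals simp [*, PySem.Str.isIn]
  by_cases h11 : kv.2 = "metric720"
  · by_cases hc : PySem.Str.isIn "metric_80" kv.1 = true
    all_goals simp [PySem.Str.isIn] at hc
    all_goals simp [*, PySem.Str.isIn]
  by_cases h12 : kv.2 = "metriclong"
  · simp [*]
  by_cases h13 : kv.2 = "metricshort"
  · simp [*]
  simp [*]

theorem PA44 (kv : String × String) : (kv.2 == "metriclong") = (fkey kv == some 44) := by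
  unfold fkey
  by_cases h0 : kv.2 = "york_hereford_bristol"
  · simp [*]
  by_cases h1 : kv.2 = "stgeorge_albion_windsor"
  · simp [*]
  by_cases h2 : kv.2 = "national"
  · simp [*]
  by_cases h3 : kv.2 = "western"
  · simp [*]
  by_cases h4 : kv.2 = "warwick"
  · simp [*]
  by_cases h5 : kv.2 = "american"
  · simp [*]
  by_cases h6 : kv.2 = "stnicholas"
  · simp [*]
  by_cases h7 : kv.2 = "wa1440"
  · simp [*]
  by_cases h8 : kv.2 = "metric1440"
  · simp [*]
  by_cases h9 : kv.2 = "wa900"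
  · simp [*]
  by_cases h10 : kv.2 = "wa720"
  · by_cases hc : PySem.Str.isIn "wa720_50_c" kv.1 = true
    all_goals simp [PySem.Str.isIn] at hc
    all_goals simp [*, PySem.Str.isIn]
  by_cases h11 : kv.2 = "metric720"
  · by_cases hc : PySem.Str.isIn "metric_80" kv.1 = true
    all_goals simp [PySem.Str.isIn] at hc
    all_goals simp [*, PySem.Str.isIn]
  by_cases h12 : kv.2 = "metriclong"
  · simp [*]
  by_cases h13 : kv.2 = "metricshort"
  · simp [*]
  simp [*]

theorem PA48 (kv : String × String) : (kv.2 == "metricshort") = (fkey kv == some 48) := by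
  unfold fkey
  by_cases h0 : kv.2 = "york_hereford_bristol"
  · simp [*]
  by_cases h1 : kv.2 = "stgeorge_albion_windsor"
  · simp [*]
  by_cases h2 : kv.2 = "national"
  · simp [*]
  by_cases h3 : kv.2 = "western"
  · simp [*]
  by_cases h4 : kv.2 = "warwick"
  · simp [*]
  by_cases h5 : kv.2 = "american"
  · simp [*]
  by_cases h6 : kv.2 = "stnicholas"
  · simp [*]
  by_cases h7 : kv.2 = "wa1440"
  · simp [*]
  by_cases h8 : kv.2 = "metric1440"
  · simp [*]
  by_cases h9 : kv.2 = "wa900"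
  · simp [*]
  by_cases h10 : kv.2 = "wa720"
  · by_cases hc : PySem.Str.isIn "wa720_50_c" kv.1 = true
    all_goals simp [PySem.Str.isIn] at hc
    all_goals simp [*, PySem.Str.isIn]
  by_cases h11 : kv.2 = "metric720"
  · by_cases hc : PySem.Str.isIn "metric_80" kv.1 = true
    all_goals simp [PySem.Str.isIn] at hc
    all_goals simp [*, PySem.Str.isIn]
  by_cases h12 : kv.2 = "metriclong"
  · simp [*]
  by_cases h13 : kv.2 = "metricshort"
  · simp [*]
  simp [*]


theorem bucket_eq (r : Int) (x : String × String) :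
    ((sortKeyB x == r) && rankB.contains x.2) = (fkey x == some r) := by
  cases hc : rankB.contains x.2 with
  | false =>
    have h1 := L1 x
    rw [hc] at h1
    have : fkey x = none := by
      cases hfk : fkey x
      · rfl
      · rw [hfk] at h1; simp at h1
    simp [this]
  | true =>
    rw [L2 x hc]
    simp

theorem sortKeyB_mem_ranks16 (x : String × String) (hc : rankB.contains x.2 = true) :
    sortKeyB x ∈ ranks16 := L3 x _ (L2 x hc)

theorem FE0 (l : List (String × String)) :
    l.filter (fun kv => kv.2 == "york_hereford_bristol") = l.filter (fun x => fkey x == some 0) :=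
  List.filter_congr (fun x _ => PA0 x)
theorem FE4 (l : List (String × String)) :
    l.filter (fun kv => kv.2 == "stgeorge_albion_windsor") = l.filter (fun x => fkey x == some 4) :=
  List.filter_congr (fun x _ => PA4 x)
theorem FE8 (l : List (String × String)) :
    l.filter (fun kv => kv.2 == "national") = l.filter (fun x => fkey x == some 8) :=
  List.filter_congr (fun x _ => PA8 x)
theorem FE12 (l : List (String × String)) :
    l.filter (fun kv => kv.2 == "western") = l.filter (fun x => fkey x == some 12) :=
  List.filter_congr (fun x _ => PA12 x)
theorem FE16 (l : List (String × String)) :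
    l.filter (fun kv => kv.2 == "warwick") = l.filter (fun x => fkey x == some 16) :=
  List.filter_congr (fun x _ => PA16 x)
theorem FE20 (l : List (String × String)) :
    l.filter (fun kv => kv.2 == "american") = l.filter (fun x => fkey x == some 20) :=
  List.filter_congr (fun x _ => PA20 x)
theorem FE24 (l : List (String × String)) :
    l.filter (fun kv => kv.2 == "stnicholas") = l.filter (fun x => fkey x == some 24) :=
  List.filter_congr (fun x _ => PA24 x)
theorem FE28 (l : List (String × String)) :
    l.filter (fun kv => kv.2 == "wa1440") = l.filter (fun x => fkey x == some 28) :=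
  List.filter_congr (fun x _ => PA28 x)
theorem FE32 (l : List (String × String)) :
    l.filter (fun kv => kv.2 == "metric1440") = l.filter (fun x => fkey x == some 32) :=
  List.filter_congr (fun x _ => PA32 x)
theorem FE36 (l : List (String × String)) :
    l.filter (fun kv => kv.2 == "wa900") = l.filter (fun x => fkey x == some 36) :=
  List.filter_congr (fun x _ => PA36 x)
theorem FE40 (l : List (String × String)) :
    l.filter (fun kv => kv.2 == "wa720" && !(PySem.Str.isIn "wa720_50_c" kv.1)) = l.filter (fun x => fkey x == some 40) :=
  List.filter_congr (fun x _ => PA40 x)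
theorem FE41 (l : List (String × String)) :
    l.filter (fun kv => kv.2 == "metric720" && !(PySem.Str.isIn "metric_80" kv.1)) = l.filter (fun x => fkey x == some 41) :=
  List.filter_congr (fun x _ => PA41 x)
theorem FE42 (l : List (String × String)) :
    l.filter (fun kv => kv.2 == "wa720" && PySem.Str.isIn "wa720_50_c" kv.1) = l.filter (fun x => fkey x == some 42) :=
  List.filter_congr (fun x _ => PA42 x)
theorem FE43 (l : List (String × String)) :
    l.filter (fun kv => kv.2 == "metric720" && PySem.Str.isIn "metric_80" kv.1) = l.filter (fun x => fkey x == some 43) :=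
  List.filter_congr (fun x _ => PA43 x)
theorem FE44 (l : List (String × String)) :
    l.filter (fun kv => kv.2 == "metriclong") = l.filter (fun x => fkey x == some 44) :=
  List.filter_congr (fun x _ => PA44 x)
theorem FE48 (l : List (String × String)) :
    l.filter (fun kv => kv.2 == "metricshort") = l.filter (fun x => fkey x == some 48) :=
  List.filter_congr (fun x _ => PA48 x)

theorem B_main (rounds : List (String × String)) :
    (PySem.Dict.ofList (PySem.List.sorted
        ((PySem.Dict.ofList rounds).items.filter (fun kv => rankB.contains kv.2)) sortKeyB)).items
      = ranks16.flatMap (fun r => (PySem.Dict.ofList rounds).items.filter (fun x => fkey x == some r)) := by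
  have hnd : ((PySem.Dict.ofList rounds).items.map Prod.fst).Nodup := by
    have := PySem.Dict.nodup_keys_ofList rounds
    simpa [PySem.Dict.keys] using this
  have hndf : (((PySem.Dict.ofList rounds).items.filter (fun kv => rankB.contains kv.2)).map Prod.fst).Nodup :=
    hnd.sublist (List.Sublist.map Prod.fst List.filter_sublist)
  have hperm := PySem.List.sorted_perm ((PySem.Dict.ofList rounds).items.filter (fun kv => rankB.contains kv.2)) sortKeyB false
  have hnds : ((PySem.List.sorted ((PySem.Dict.ofList rounds).items.filter (fun kv => rankB.contains kv.2)) sortKeyB).map Prod.fst).Nodup :=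
    ((hperm.map Prod.fst).nodup_iff).mpr hndf
  -- dict() of a unique-key pair list is that list again
  have step1 : (PySem.Dict.ofList (PySem.List.sorted
        ((PySem.Dict.ofList rounds).items.filter (fun kv => rankB.contains kv.2)) sortKeyB)).items
      = PySem.List.sorted ((PySem.Dict.ofList rounds).items.filter (fun kv => rankB.contains kv.2)) sortKeyB := by
    show ((PySem.List.sorted _ sortKeyB).foldl (fun acc q => acc.insert q.1 q.2) PySem.Dict.empty).items = _
    rw [PySem.Dict.items_foldl_insert_fresh _ Prod.fst Prod.snd PySem.Dict.empty
        (fun a _ => PySem.Dict.contains_empty a.1) hnds]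
    simp [PySem.Dict.empty]
  rw [step1]
  rw [sorted_buckets sortKeyB ranks16 (by decide) _
      (fun x hx => sortKeyB_mem_ranks16 x (List.mem_filter.mp hx).2)]
  simp only [List.filter_filter, bucket_eq]

theorem A_main (rounds : List (String × String)) (age gender bowstyle : Option String) :
    order_rounds rounds age gender bowstyle
      = ranks16.flatMap (fun r => (PySem.Dict.ofList rounds).items.filter (fun x => fkey x == some r)) := by
  have hnd : ((PySem.Dict.ofList rounds).items.map Prod.fst).Nodup := by
    have := PySem.Dict.nodup_keys_ofList rounds
    simpa [PySem.Dict.keys] using this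
  have hch := chain_items fkey (PySem.Dict.ofList rounds).items hnd ranks16 PySem.Dict.empty
    (by simp [PySem.Dict.empty, PySem.Dict.keys]) (by decide)
    (fun x _ r _ _ => PySem.Dict.contains_empty x.1)
  unfold order_rounds
  simp only [List.foldl_cons, List.foldl_nil, String.reduceBEq, if_true, if_false,
    Bool.false_eq_true, reduceIte]
  simp only [FE0, FE4, FE8, FE12, FE16, FE20, FE24, FE28, FE32, FE36, FE40, FE41, FE42, FE43, FE44, FE48]
  simp only [ranks16, List.foldl_cons, List.foldl_nil] at hch
  rw [hch]
  simp [PySem.Dict.empty, ranks16]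

-- ===== VERDICT is at the bottom =====
theorem B_unfold (rounds : List (String × String)) (age gender bowstyle : Option String) :
    order_rounds_alt rounds age gender bowstyle
      = ranks16.flatMap (fun r => (PySem.Dict.ofList rounds).items.filter (fun x => fkey x == some r)) := by
  unfold order_rounds_alt
  simp only [rank_eq_rankB]
  exact B_main rounds

theorem order_rounds_spec : Claim_equal_order_rounds := by
  intro rounds age gender bowstyle _
  unfold Spec_order_rounds
  rw [A_main rounds age gender bowstyle, B_unfold rounds age gender bowstyle]
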